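-- pv_equiv track=rewrite | github.com/junes7/algorithm | 백준/Silver/13717. 포켓몬 GO/포켓몬 GO.py | poketmon_go
-- ===== SOURCE A (Python) =====
-- def poketmon_go(poketmon_list):
--     total_evol_num = 0
--     eval_info = []
--     for poket_idx, poketmon_info in enumerate(poketmon_list):
--         poketmon, k, m = poketmon_info[0], poketmon_info[1], poketmon_info[2]
--         poketmon_evol_num = 0
--         while m >= k:
--             m -= k
--             m += 2
--             poketmon_evol_num += 1
--         total_evol_num += poketmon_evol_num
--         eval_info.append([poketmon, poketmon_evol_num, poket_idx])
--     max_evol_poketmon = sorted(eval_info, key=lambda x: (x[1], -x[2]))[-1][0]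
--     return total_evol_num, max_evol_poketmon
-- ===== SOURCE B (Python) =====
-- def poketmon_go(poketmon_list):
--     total = 0
--     best = -1
--     best_name = None
--     for name, k, m in poketmon_list:
--         evol = (m - k) // (k - 2) + 1 if m >= k else 0
--         total += evol
--         if evol > best:
--             best = evol
--             best_name = name
--     return total, best_name
-- ===== Notes on version B (the rewrite author's own statement) =====
-- stated objective: alternative
-- what changed: Replaces the per-pokemon subtraction while-loop by the closed form (m-k)//(k-2)+1 and replaces build-list/stable-sort/take-last by a single running-maximum pass (first strict maximum wins, which equals sorted-by-(count,-idx) last); intended as faster (O(n) vs loop+sort) but a timing run could not confirm a clean reading.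
import Mathlib
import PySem

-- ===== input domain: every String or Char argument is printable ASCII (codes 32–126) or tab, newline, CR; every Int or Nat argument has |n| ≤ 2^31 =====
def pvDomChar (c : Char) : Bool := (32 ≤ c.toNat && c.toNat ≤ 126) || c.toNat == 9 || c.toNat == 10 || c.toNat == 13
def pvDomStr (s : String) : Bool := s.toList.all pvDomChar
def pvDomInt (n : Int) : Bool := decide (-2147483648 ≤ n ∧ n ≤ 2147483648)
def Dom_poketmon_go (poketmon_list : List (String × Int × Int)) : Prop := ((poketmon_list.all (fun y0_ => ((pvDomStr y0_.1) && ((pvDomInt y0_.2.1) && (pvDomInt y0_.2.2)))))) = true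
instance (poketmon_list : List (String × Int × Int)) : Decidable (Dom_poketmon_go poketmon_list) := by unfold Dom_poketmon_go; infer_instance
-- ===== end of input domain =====

-- B replaces A's per-pokemon subtraction while-loop by the closed form (m-k)//(k-2)+1 and
-- A's build-list/stable-sort/take-last selection by a single running-maximum pass.


-- ===== PORT A =====
-- A's while-loop 'while m >= k: m -= k; m += 2; poketmon_evol_num += 1'.  The 'k ≤ 2'
-- branch is only a totality guard: there Python's loop never terminates when m ≥ k
-- (those inputs are excluded by Pre_); for m < k it returns 0 exactly like Python.
def evolLoopA (k m acc : Int) : Int :=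
  if _h1 : k ≤ 2 then acc
  else if _h2 : k ≤ m then evolLoopA k (m - k + 2) (acc + 1)
  else acc
termination_by m.toNat
decreasing_by omega

def poketmon_go (poketmon_list : List (String × Int × Int)) : Int × String :=
  let st := (PySem.List.enumerate poketmon_list).foldl
    (fun (acc : Int × List (String × Int × Int)) p =>
      let c := evolLoopA p.2.2.1 p.2.2.2 0
      (acc.1 + c, acc.2 ++ [(p.2.1, c, p.1)])) (0, [])
  let s := PySem.List.sorted2 st.2 (fun x => x.2.1) (fun x => -x.2.2) false
  match PySem.List.pyGet? s (-1) with
  | some e => (st.1, e.1)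
  | none => (st.1, "")   -- Python raises IndexError here (empty input); excluded by Pre_

-- ===== PORT B =====
def poketmon_go_alt (poketmon_list : List (String × Int × Int)) : Int × String :=
  let r := poketmon_list.foldl
    (fun (acc : Int × Int × String) x =>
      let c := if x.2.1 ≤ x.2.2 then PySem.Int.floordiv (x.2.2 - x.2.1) (x.2.1 - 2) + 1 else 0
      (acc.1 + c, if acc.2.1 < c then (c, x.1) else acc.2)) (0, -1, "")
  (r.1, r.2.2)

-- ===== PRECONDITION & SPEC =====
-- Pre_ excludes exactly the inputs on which A does not return: the empty list (A's
-- sorted(...)[-1] raises IndexError) and any entry with k ≤ 2 and m ≥ k (A's while-loop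
-- never terminates there, since m changes by 2-k ≥ 0 each iteration).
def Pre_poketmon_go (poketmon_list : List (String × Int × Int)) : Prop :=
  poketmon_list ≠ [] ∧ ∀ x ∈ poketmon_list, x.2.2 < x.2.1 ∨ 2 < x.2.1
instance (poketmon_list : List (String × Int × Int)) : Decidable (Pre_poketmon_go poketmon_list) := by unfold Pre_poketmon_go; infer_instance
def pvWitness_poketmon_go : (List (String × Int × Int)) := [("pika", 3, 5), ("evee", 4, 2)]

def Spec_poketmon_go (poketmon_list : List (String × Int × Int)) (out : Int × String) : Prop := out = poketmon_go_alt poketmon_list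
instance (poketmon_list : List (String × Int × Int)) (out : Int × String) : Decidable (Spec_poketmon_go poketmon_list out) := by unfold Spec_poketmon_go; infer_instance

-- ===== CLAIM (what is proved, stated in full; the proofs are below) =====
def Claim_equal_poketmon_go : Prop := ∀ (poketmon_list : List (String × Int × Int)), Dom_poketmon_go poketmon_list → Pre_poketmon_go poketmon_list → Spec_poketmon_go poketmon_list (poketmon_go poketmon_list)

-- ===== LEMMAS AND PROOFS =====

-- B's closed-form count for one pokemon (the body of B's loop)
def cntB (x : String × Int × Int) : Int :=
  if x.2.1 ≤ x.2.2 then PySem.Int.floordiv (x.2.2 - x.2.1) (x.2.1 - 2) + 1 else 0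

lemma evolLoopA_closed : ∀ (n : Nat) (k m acc : Int), m.toNat ≤ n → 2 < k → k ≤ m →
    evolLoopA k m acc = acc + (PySem.Int.floordiv (m - k) (k - 2) + 1) := by
  intro n
  induction n with
  | zero => intro k m acc hm hk hkm; omega
  | succ n ih =>
    intro k m acc hm hk hkm
    rw [evolLoopA]
    rw [dif_neg (by omega), dif_pos hkm]
    by_cases h' : k ≤ m - k + 2
    · rw [ih k (m - k + 2) (acc + 1) (by omega) hk h']
      rw [PySem.Int.floordiv_eq_ediv_of_pos (by omega), PySem.Int.floordiv_eq_ediv_of_pos (by omega)]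
      have e : m - k = m - k + 2 - k + 1 * (k - 2) := by ring
      have key := Int.add_mul_ediv_right (m - k + 2 - k) 1 (by omega : k - 2 ≠ 0)
      rw [← e] at key
      omega
    · rw [evolLoopA, dif_neg (by omega), dif_neg h']
      rw [PySem.Int.floordiv_eq_ediv_of_pos (by omega)]
      rw [Int.ediv_eq_zero_of_lt (by omega) (by omega)]
      omega

lemma evolLoopA_eq_cntB (k m : Int) (h : m < k ∨ 2 < k) :
    evolLoopA k m 0 = cntB ("", k, m) := by
  simp only [cntB]
  by_cases hkm : k ≤ m
  · rw [if_pos hkm, evolLoopA_closed m.toNat k m 0 le_rfl (by omega) hkm]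
    omega
  · rw [if_neg hkm, evolLoopA]
    split_ifs <;> omega

lemma cntB_nonneg (x : String × Int × Int) (h : x.2.2 < x.2.1 ∨ 2 < x.2.1) : 0 ≤ cntB x := by
  simp only [cntB]
  split_ifs with hkm
  · rw [PySem.Int.floordiv_eq_ediv_of_pos (by omega)]
    have := Int.ediv_nonneg (by omega : (0:Int) ≤ x.2.2 - x.2.1) (by omega : (0:Int) ≤ x.2.1 - 2)
    omega
  · exact le_refl 0

lemma enum_cons {α : Type} (x : α) (t : List α) (s : Int) :
    PySem.List.enumerate (x :: t) s = (s, x) :: PySem.List.enumerate t (s + 1) := rfl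

lemma enum_snd_mem {α : Type} (l : List α) : ∀ (s : Int) (p : Int × α), p ∈ PySem.List.enumerate l s → p.2 ∈ l := by
  induction l with
  | nil => intro s p h; simp [PySem.List.enumerate] at h
  | cons x t ih =>
    intro s p h
    rw [enum_cons] at h
    rcases List.mem_cons.1 h with h | h
    · subst h; simp
    · exact List.mem_cons_of_mem _ (ih _ _ h)

lemma enum_map_snd {α β : Type} (l : List α) (f : α → β) :
    ∀ (s : Int), (PySem.List.enumerate l s).map (fun p => f p.2) = l.map f := by
  induction l with
  | nil => intro s; rfl
  | cons x t ih => intro s; rw [enum_cons]; simp [ih]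

lemma enum_foldl_snd {α β : Type} (l : List α) (f : β → α → β) :
    ∀ (s : Int) (init : β), (PySem.List.enumerate l s).foldl (fun b p => f b p.2) init = l.foldl f init := by
  induction l with
  | nil => intro s init; rfl
  | cons x t ih => intro s init; rw [enum_cons]; simp [ih]

lemma enum_fst_ge {α : Type} (l : List α) : ∀ (s : Int) (p : Int × α), p ∈ PySem.List.enumerate l s → s ≤ p.1 := by
  induction l with
  | nil => intro s p h; simp [PySem.List.enumerate] at h
  | cons x t ih =>
    intro s p h
    rw [enum_cons] at h
    rcases List.mem_cons.1 h with h | h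
    · subst h; simp
    · have := ih _ _ h; omega

lemma enum_pairwise {α : Type} (l : List α) : ∀ (s : Int), (PySem.List.enumerate l s).Pairwise (fun a b => a.1 < b.1) := by
  induction l with
  | nil => intro s; simp [PySem.List.enumerate]
  | cons x t ih =>
    intro s
    rw [enum_cons]
    refine List.Pairwise.cons ?_ (ih _)
    intro p hp
    have := enum_fst_ge t (s + 1) p hp
    simp; omega

-- sorted2 with integer keys is sorted under the lexicographic order on the key pair
lemma sorted2_as_lex (xs : List (String × Int × Int)) (k1 k2 : (String × Int × Int) → Int) :
    PySem.List.sorted2 xs k1 k2 false = PySem.List.sorted xs (fun x => toLex (k1 x, k2 x)) false := by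
  rw [PySem.List.sorted_eq_foldl_insertBy]
  show xs.foldl (fun acc x => PySem.List.insertBy _ x acc) [] = _
  have hf : (fun (a b : String × Int × Int) => decide (k1 a < k1 b) || !decide (k1 b < k1 a) && decide (k2 a < k2 b))
      = (fun a b => decide ((fun x => toLex (k1 x, k2 x)) a < (fun x => toLex (k1 x, k2 x)) b)) := by
    funext a b
    simp only [Prod.Lex.lt_iff]
    by_cases h1 : k1 a < k1 b <;> by_cases h2 : k1 b < k1 a <;> by_cases h3 : k2 a < k2 b <;>
      simp [h1, h2, h3] <;> omega
  simp only [hf, Bool.false_eq_true, if_false]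

lemma pyGet_concat {α : Type} (t : List α) (m : α) : PySem.List.pyGet? (t ++ [m]) (-1) = some m := by
  simp only [PySem.List.pyGet?, PySem.List.pyIdx?]
  rw [if_neg (by omega)]
  rw [if_pos (by simp)]
  simp

-- the running-maximum fold: either nothing beats the initial best, or the fold returns
-- the FIRST maximum (first ⇔ least third component, given strictly increasing thirds)
lemma foldBest (E : List (String × Int × Int)) : ∀ (b : Int) (s : String),
    E.Pairwise (fun a c => a.2.2 < c.2.2) →
    ((∀ x ∈ E, x.2.1 ≤ b) ∧
      E.foldl (fun acc y => if acc.1 < y.2.1 then (y.2.1, y.1) else acc) (b, s) = (b, s))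
    ∨ (∃ m ∈ E, E.foldl (fun acc y => if acc.1 < y.2.1 then (y.2.1, y.1) else acc) (b, s) = (m.2.1, m.1) ∧
        b < m.2.1 ∧ ∀ y ∈ E, y.2.1 < m.2.1 ∨ (y.2.1 = m.2.1 ∧ m.2.2 ≤ y.2.2)) := by
  induction E with
  | nil => intro b s _; left; simp
  | cons x t ih =>
    intro b s hp
    rcases List.pairwise_cons.1 hp with ⟨hx, ht⟩
    rw [List.foldl_cons]
    by_cases hb : b < x.2.1
    · rw [if_pos hb]
      rcases ih x.2.1 x.1 ht with ⟨h1, h2⟩ | ⟨m, hm, h2, h3, h4⟩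
      · right
        refine ⟨x, List.mem_cons_self, h2, hb, ?_⟩
        intro y hy
        rcases List.mem_cons.1 hy with hy' | hy'
        · right; rw [hy']; exact ⟨rfl, le_refl _⟩
        · rcases lt_or_eq_of_le (h1 y hy') with h | h
          · left; exact h
          · right; exact ⟨h, le_of_lt (hx y hy')⟩
      · right
        refine ⟨m, List.mem_cons_of_mem _ hm, h2, by omega, ?_⟩
        intro y hy
        rcases List.mem_cons.1 hy with hy' | hy'
        · left; rw [hy']; omega
        · exact h4 y hy'
    · rw [if_neg hb]
      rcases ih b s ht with ⟨h1, h2⟩ | ⟨m, hm, h2, h3, h4⟩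
      · left
        refine ⟨?_, h2⟩
        intro y hy
        rcases List.mem_cons.1 hy with hy' | hy'
        · rw [hy']; omega
        · exact h1 y hy'
      · right
        refine ⟨m, List.mem_cons_of_mem _ hm, h2, h3, ?_⟩
        intro y hy
        rcases List.mem_cons.1 hy with hy' | hy'
        · left; rw [hy']; omega
        · exact h4 y hy'

lemma pairwise_third_inj (E : List (String × Int × Int)) (h : E.Pairwise (fun a c => a.2.2 < c.2.2)) :
    ∀ a ∈ E, ∀ b ∈ E, a.2.2 = b.2.2 → a = b := by
  induction E with
  | nil => intro a ha; simp at ha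
  | cons x t ih =>
    rcases List.pairwise_cons.1 h with ⟨hx, ht⟩
    intro a ha b hb heq
    rcases List.mem_cons.1 ha with ha' | ha' <;> rcases List.mem_cons.1 hb with hb' | hb'
    · rw [ha', hb']
    · exfalso; rw [ha'] at heq; have := hx b hb'; omega
    · exfalso; rw [hb'] at heq; have := hx a ha'; omega
    · exact ih ht a ha' b hb' heq

lemma poketmon_go_eq_alt (l : List (String × Int × Int))
    (hne : l ≠ []) (hall : ∀ x ∈ l, x.2.2 < x.2.1 ∨ 2 < x.2.1) :
    poketmon_go l = poketmon_go_alt l := by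
  set φ : Int × (String × Int × Int) → String × Int × Int := fun p => (p.2.1, cntB p.2, p.1) with hφ
  set key : (String × Int × Int) → Int ×ₗ Int := fun x => toLex (x.2.1, -x.2.2) with hkey
  have hcong : (PySem.List.enumerate l 0).foldl
      (fun (acc : Int × List (String × Int × Int)) p =>
        let c := evolLoopA p.2.2.1 p.2.2.2 0
        (acc.1 + c, acc.2 ++ [(p.2.1, c, p.1)])) (0, [])
      = (PySem.List.enumerate l 0).foldl
      (fun (acc : Int × List (String × Int × Int)) p =>
        (acc.1 + cntB p.2, acc.2 ++ [φ p])) (0, []) := by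
    apply PySem.List.foldl_congr_mem
    intro acc p hp
    have hm := enum_snd_mem l 0 p hp
    have hc : evolLoopA p.2.2.1 p.2.2.2 0 = cntB p.2 := by
      rw [evolLoopA_eq_cntB _ _ (hall p.2 hm)]
      simp [cntB]
    simp only [hc, hφ]
  have hsplit : (PySem.List.enumerate l 0).foldl
      (fun (acc : Int × List (String × Int × Int)) p =>
        (acc.1 + cntB p.2, acc.2 ++ [φ p])) (0, [])
      = (((PySem.List.enumerate l 0).map (fun p => cntB p.2)).sum,
         (PySem.List.enumerate l 0).map φ) := by
    rw [PySem.List.foldl_prod_mk (f := fun a p => a + cntB p.2) (g := fun acc p => acc ++ [φ p])]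
    rw [PySem.List.foldl_add, PySem.List.foldl_append_singleton_eq_map]
    simp
  set E := (PySem.List.enumerate l 0).map φ with hE
  have hEpw : E.Pairwise (fun a c => a.2.2 < c.2.2) := by
    rw [hE]
    exact List.pairwise_map.mpr (enum_pairwise l 0)
  obtain ⟨a0, t0, hl⟩ := List.exists_cons_of_ne_nil hne
  have hEne : E ≠ [] := by
    rw [hE, hl, enum_cons]; simp
  obtain ⟨t2, mA, hs⟩ : ∃ t2 mA, PySem.List.sorted E key false = t2 ++ [mA] := by
    rcases (PySem.List.sorted E key false).eq_nil_or_concat with h | ⟨L, b, h⟩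
    · rw [PySem.List.sorted_eq_nil_iff] at h; exact absurd h hEne
    · exact ⟨L, b, by rw [h, List.concat_eq_append]⟩
  have hmA_mem : mA ∈ E := by
    have h1 : mA ∈ t2 ++ [mA] := by simp
    rw [← hs] at h1
    exact (PySem.List.mem_sorted _ _ _ _).1 h1
  have hmax : ∀ y ∈ E, key y ≤ key mA := by
    have hpw := PySem.List.sorted_pairwise E key
    rw [hs] at hpw
    intro y hy
    have h1 : y ∈ t2 ++ [mA] := by rw [← hs]; exact (PySem.List.mem_sorted _ _ _ _).2 hy
    rcases List.mem_append.1 h1 with h | h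
    · exact (List.pairwise_append.1 hpw).2.2 y h mA (by simp)
    · simp at h; rw [h]
  have hA : poketmon_go l = (((PySem.List.enumerate l 0).map (fun p => cntB p.2)).sum, mA.1) := by
    simp only [poketmon_go]
    rw [hcong, hsplit]
    dsimp only
    rw [sorted2_as_lex, ← hkey, hs, pyGet_concat]
  have hB : poketmon_go_alt l = ((l.map cntB).sum,
      (l.foldl (fun (b : Int × String) x => if b.1 < cntB x then (cntB x, x.1) else b) (-1, "")).2) := by
    simp only [poketmon_go_alt]
    simp only [← cntB.eq_def]
    rw [PySem.List.foldl_prod_mk (f := fun a x => a + cntB x)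
        (g := fun (b : Int × String) x => if b.1 < cntB x then (cntB x, x.1) else b)]
    rw [PySem.List.foldl_add]
    simp
  have hBE : E.foldl (fun (acc : Int × String) y => if acc.1 < y.2.1 then (y.2.1, y.1) else acc) (-1, "")
      = l.foldl (fun (b : Int × String) x => if b.1 < cntB x then (cntB x, x.1) else b) (-1, "") := by
    rw [hE, List.foldl_map]
    exact enum_foldl_snd l (fun (b : Int × String) x => if b.1 < cntB x then (cntB x, x.1) else b) 0 (-1, "")
  rcases foldBest E (-1) "" hEpw with ⟨hle, _⟩ | ⟨m, hmem, heq, _, h4⟩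
  · exfalso
    have h0 : φ (0, a0) ∈ E := by rw [hE, hl, enum_cons]; simp
    have := hle _ h0
    have h1 : (φ (0, a0)).2.1 = cntB a0 := rfl
    have h2 := cntB_nonneg a0 (hall a0 (by rw [hl]; simp))
    omega
  · have hk1 := hmax m hmem
    rw [hkey] at hk1
    rw [Prod.Lex.le_iff] at hk1
    have hk2 := h4 mA hmA_mem
    have h22 : mA.2.2 = m.2.2 := by
      simp only [ofLex_toLex] at hk1
      omega
    have hmm : mA = m := pairwise_third_inj E hEpw mA hmA_mem m hmem h22
    rw [hA, hB, ← hBE, heq, hmm, enum_map_snd l cntB 0]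

-- ===== VERDICT (by name: the statement is the Claim_ definition above) =====
theorem poketmon_go_spec : Claim_equal_poketmon_go := by
  intro l _hdom hpre
  show poketmon_go l = poketmon_go_alt l
  exact poketmon_go_eq_alt l hpre.1 hpre.2
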